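-- pv_equiv track=rewrite | github.com/mrbartrns/algorithm-and-structure | coding_test_with_python/greedy/p1.py | solve
-- ===== SOURCE A (Python) =====
-- def solve(numbers, m, k):
--     numbers.sort()
--     cnt = m
--     res = 0
--     while cnt - k > 0:
--         res += k * numbers[-1]
--         cnt -= k
--         res += numbers[-2]
--         cnt -= 1
--
--     if cnt > 0:
--         res += cnt * numbers[-1]
--     return res
-- ===== SOURCE B (Python) =====
-- def solve(numbers, m, k):
--     if m <= 0:
--         return 0
--     s = sorted(numbers)
--     top = s[-1]
--     cycles, rem = divmod(m, k + 1)
--     if cycles == 0: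
--         return rem * top
--     second = s[-2]
--     return cycles * (k * top + second) + rem * top
-- ===== Notes on version B (the rewrite author's own statement) =====
-- stated objective: simpler
-- what changed: B replaces A's while loop (which accumulates k*top+second once per block of k+1 picks) with the closed form cycles*(k*top+second)+rem*top where cycles,rem=divmod(m,k+1), reading the second-largest element only when a full cycle occurs; B also does not mutate the input list (A sorts it in place).
import Mathlib
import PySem

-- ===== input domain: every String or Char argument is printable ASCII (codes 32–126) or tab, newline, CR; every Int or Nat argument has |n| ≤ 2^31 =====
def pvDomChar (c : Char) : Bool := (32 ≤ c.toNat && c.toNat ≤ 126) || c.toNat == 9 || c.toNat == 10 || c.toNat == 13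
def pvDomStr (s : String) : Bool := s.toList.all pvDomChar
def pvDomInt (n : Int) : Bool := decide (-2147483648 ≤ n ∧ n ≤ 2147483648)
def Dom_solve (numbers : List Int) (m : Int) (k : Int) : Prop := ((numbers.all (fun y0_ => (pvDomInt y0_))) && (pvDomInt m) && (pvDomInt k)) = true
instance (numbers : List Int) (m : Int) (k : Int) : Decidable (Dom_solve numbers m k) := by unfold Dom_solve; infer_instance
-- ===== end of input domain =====

-- B replaces A's accumulation loop by the closed form cycles*(k*top+second)+rem*top with
-- cycles, rem = divmod(m, k+1), reading the second-largest only when cycles > 0 (objective: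
-- simpler). Side effect: A sorts `numbers` in place, B does not mutate its argument; the
-- equivalence proved here is about the return value only.

-- ===== PORT A =====
-- A's while loop: each iteration adds k*t1 + t2 to res and subtracts k+1 from cnt, while cnt - k > 0.
-- Fuel m.toNat suffices: inside Pre_ the loop runs only when k ≥ 0, so cnt drops by at least 1 per
-- iteration; outside Pre_ the Python loop may not terminate and nothing is claimed.
def solveWhile (t1 t2 k : Int) : Nat → Int → Int → (Int × Int)
  | 0, cnt, res => (cnt, res)
  | fuel + 1, cnt, res =>
    if cnt - k > 0 then solveWhile t1 t2 k fuel (cnt - k - 1) (res + k * t1 + t2)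
    else (cnt, res)

def solve (numbers : List Int) (m : Int) (k : Int) : Int :=
  let s := PySem.List.sorted numbers (fun x => x) false
  let t1 := (PySem.List.pyGet? s (-1)).getD 0   -- none (IndexError) only outside Pre_
  let t2 := (PySem.List.pyGet? s (-2)).getD 0
  let p := solveWhile t1 t2 k m.toNat m 0
  if p.1 > 0 then p.2 + p.1 * t1 else p.2

-- ===== PORT B =====
def solve_alt (numbers : List Int) (m : Int) (k : Int) : Int :=
  if m ≤ 0 then 0
  else
    let s := PySem.List.sorted numbers (fun x => x) false
    let top := (PySem.List.pyGet? s (-1)).getD 0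
    let cycles := PySem.Int.floordiv m (k + 1)
    let rem := PySem.Int.mod m (k + 1)
    if cycles = 0 then rem * top
    else
      let second := (PySem.List.pyGet? s (-2)).getD 0
      cycles * (k * top + second) + rem * top

-- ===== PRECONDITION & SPEC =====
-- Pre_ excludes exactly the inputs on which A does not return: it diverges when k < 0 and m > k
-- (cnt grows each iteration), raises IndexError on numbers[-2] when the loop runs (m > k) on a
-- list of fewer than 2 elements, and raises IndexError on numbers[-1] when 0 < m on an empty list.
def Pre_solve (numbers : List Int) (m : Int) (k : Int) : Prop :=
  (0 ≤ k ∨ m ≤ k) ∧ (k < m → 2 ≤ numbers.length) ∧ (0 < m → 1 ≤ numbers.length)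
instance (numbers : List Int) (m : Int) (k : Int) : Decidable (Pre_solve numbers m k) := by
  unfold Pre_solve; infer_instance
def pvWitness_solve : List Int × Int × Int := ([3, 1, 4], 7, 2)
def Spec_solve (numbers : List Int) (m : Int) (k : Int) (out : Int) : Prop := out = solve_alt numbers m k
instance (numbers : List Int) (m : Int) (k : Int) (out : Int) : Decidable (Spec_solve numbers m k out) := by unfold Spec_solve; infer_instance

-- ===== CLAIM (what is proved, stated in full; the proofs are below) =====
def Claim_equal_solve : Prop := ∀ (numbers : List Int) (m : Int) (k : Int), Dom_solve numbers m k → Pre_solve numbers m k → Spec_solve numbers m k (solve numbers m k)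

-- ===== LEMMAS AND PROOFS =====

-- The while loop followed by A's final `if` equals the closed form, for k ≥ 0 and enough fuel.
theorem solveWhile_closed (t1 t2 k : Int) (hk : 0 ≤ k) :
    ∀ (fuel : Nat) (cnt res : Int), cnt.toNat ≤ fuel →
      (let p := solveWhile t1 t2 k fuel cnt res
       if p.1 > 0 then p.2 + p.1 * t1 else p.2)
      = res + (if 0 < cnt then
          PySem.Int.floordiv cnt (k + 1) * (k * t1 + t2) + PySem.Int.mod cnt (k + 1) * t1
        else 0) := by
  intro fuel
  induction fuel with
  | zero =>
    intro cnt res h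
    have hc : cnt ≤ 0 := by omega
    simp only [solveWhile]
    rw [if_neg (by omega), if_neg (by omega)]
    ring
  | succ n ih =>
    intro cnt res h
    simp only [solveWhile]
    by_cases hgt : cnt - k > 0
    · rw [if_pos hgt]
      have hrec := ih (cnt - k - 1) (res + k * t1 + t2) (by omega)
      rw [hrec]
      have hb : (0:Int) < k + 1 := by omega
      simp only [PySem.Int.floordiv_eq_ediv_of_pos hb, PySem.Int.mod_eq_emod_of_pos hb]
      have hdiv : cnt / (k + 1) = (cnt - k - 1) / (k + 1) + 1 := by
        have := Int.add_mul_ediv_right (cnt - k - 1) 1 (show (k+1:Int) ≠ 0 by omega)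
        have he : cnt - k - 1 + 1 * (k + 1) = cnt := by ring
        rw [he] at this
        omega
      have hmod : cnt % (k + 1) = (cnt - k - 1) % (k + 1) := by
        have := Int.add_mul_emod_self_left (a := cnt - k - 1) (b := k + 1) (c := 1)
        have he : cnt - k - 1 + (k + 1) * 1 = cnt := by ring
        rw [he] at this
        exact this
      by_cases hc' : 0 < cnt - k - 1
      · rw [if_pos hc', if_pos (by omega), hdiv, hmod]
        ring
      · have hcnt : cnt = k + 1 := by omega
        rw [if_neg hc', if_pos (by omega), hcnt]
        have h1 : (k + 1) / (k + 1) = (1:Int) := Int.ediv_self (by omega)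
        have h2 : (k + 1) % (k + 1) = (0:Int) := Int.emod_self (a := k + 1)
        rw [h1, h2]
        ring
    · rw [if_neg hgt]
      by_cases hc : 0 < cnt
      · rw [if_pos hc, if_pos hc]
        have hb : (0:Int) < k + 1 := by omega
        rw [PySem.Int.floordiv_eq_ediv_of_pos hb, PySem.Int.mod_eq_emod_of_pos hb]
        have hdiv : cnt / (k + 1) = 0 := Int.ediv_eq_zero_of_lt (by omega) (by omega)
        have hmod : cnt % (k + 1) = cnt := Int.emod_eq_of_lt (by omega) (by omega)
        rw [hdiv, hmod]
        ring
      · rw [if_neg hc, if_neg hc]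
        ring

-- ===== VERDICT (by name: the statement is the Claim_ definition above) =====
theorem solve_spec : Claim_equal_solve := by
  intro numbers m k _ hpre
  obtain ⟨hk, _, _⟩ := hpre
  unfold Spec_solve solve solve_alt
  by_cases hm : m ≤ 0
  · -- fuel m.toNat = 0, loop returns (m, 0), final `if` false; B returns 0
    have hfuel : m.toNat = 0 := by omega
    rw [hfuel]
    simp only [solveWhile]
    rw [if_neg (by omega), if_pos hm]
  · -- m > 0, so Pre_ forces 0 ≤ k (m ≤ k would give 0 < k)
    have hk0 : 0 ≤ k := by omega
    rw [if_neg hm]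
    have hcf := solveWhile_closed
      ((PySem.List.pyGet? (PySem.List.sorted numbers (fun x => x) false) (-1)).getD 0)
      ((PySem.List.pyGet? (PySem.List.sorted numbers (fun x => x) false) (-2)).getD 0)
      k hk0 m.toNat m 0 (le_refl _)
    simp only at hcf ⊢
    rw [hcf, if_pos (by omega)]
    by_cases hc : PySem.Int.floordiv m (k + 1) = 0
    · rw [if_pos hc, hc]; ring
    · rw [if_neg hc]; ring
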